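-- pv_equiv track=rewrite | github.com/mjcumming/cobalt-r6-surf | src/cobalt_boat/services/platform.py | _contains_ordered_chain
-- ===== SOURCE A (Python) =====
-- def _contains_ordered_chain(
--     sequence: list[int], required_prefix: list[int], target_pgns: set[int]
-- ) -> bool:
--     if not sequence:
--         return False
--     try:
--         first = sequence.index(required_prefix[0])
--         second = sequence.index(required_prefix[1], first + 1)
--     except ValueError:
--         return False
--     for value in sequence[second + 1 :]:
--         if value in target_pgns:
--             return True
--     return False
-- ===== SOURCE B (Python) =====
-- def _contains_ordered_chain(
--     sequence: list[int], required_prefix: list[int], target_pgns: set[int]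
-- ) -> bool:
--     # Index-based approach: one pass builds a map value -> list of occurrence
--     # positions; the answer is then computed by lookups: first occurrence of
--     # prefix[0], first later occurrence of prefix[1], and finally whether any
--     # target's LAST occurrence lies beyond that point.
--     positions = {}
--     for i, value in enumerate(sequence):
--         positions.setdefault(value, []).append(i)
--     if not positions:
--         return False
--     occ0 = positions.get(required_prefix[0])
--     if occ0 is None:
--         return False
--     first = occ0[0]
--     second = next((j for j in positions.get(required_prefix[1], []) if j > first), None)
--     if second is None:
--         return False
--     return any(t in positions and positions[t][-1] > second for t in target_pgns)
-- ===== Notes on version B (the rewrite author's own statement) =====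
-- stated objective: alternative
-- what changed: Replaced A's in-order index()/slice scans by an occurrence-position index: one pass builds a dict value -> list of positions, then the answer is computed by lookups (first position of prefix[0], first later position of prefix[1]) and a per-target last-occurrence comparison over target_pgns instead of rescanning the sequence tail.
import Mathlib
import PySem

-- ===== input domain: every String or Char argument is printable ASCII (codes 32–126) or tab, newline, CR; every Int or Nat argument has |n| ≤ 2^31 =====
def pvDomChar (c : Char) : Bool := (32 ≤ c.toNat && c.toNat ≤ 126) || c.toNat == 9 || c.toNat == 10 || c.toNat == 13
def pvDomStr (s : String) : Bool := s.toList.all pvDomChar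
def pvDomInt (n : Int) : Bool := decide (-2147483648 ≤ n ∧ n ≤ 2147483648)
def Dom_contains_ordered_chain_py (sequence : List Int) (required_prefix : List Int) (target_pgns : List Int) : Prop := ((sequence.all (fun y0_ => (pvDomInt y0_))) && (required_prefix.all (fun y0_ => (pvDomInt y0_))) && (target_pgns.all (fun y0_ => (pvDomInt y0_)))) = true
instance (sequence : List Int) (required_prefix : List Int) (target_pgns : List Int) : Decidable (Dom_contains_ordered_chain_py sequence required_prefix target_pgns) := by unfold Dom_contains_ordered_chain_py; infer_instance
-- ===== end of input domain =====

-- B replaces A's sequential index/slice scans by an occurrence-position index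
-- (one pass builds value -> positions; the answer is computed by lookups and a
-- last-occurrence test over the targets); objective: alternative.


-- ===== PORT A =====
-- A's final 'for value in …: if value in target_pgns: return True / return False' loop
def cocScanA (target_pgns : List Int) : List Int → Bool
  | [] => false
  | v :: rest => if v ∈ target_pgns then true else cocScanA target_pgns rest

def contains_ordered_chain_py (sequence : List Int) (required_prefix : List Int) (target_pgns : List Int) : Bool :=
  if sequence = [] then false
  else
    match PySem.List.pyGet? required_prefix 0 with
    | none => false      -- IndexError (excluded by Pre_)
    | some p0 =>
      match PySem.List.index? sequence p0 with
      | none => false    -- ValueError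
      | some first =>
        match PySem.List.pyGet? required_prefix 1 with
        | none => false  -- IndexError (excluded by Pre_)
        | some p1 =>
          -- sequence.index(p1, first + 1): exact for a nonnegative start —
          -- first occurrence inside sequence[first+1:], reported at its absolute index
          match (PySem.List.index? (sequence.drop (first + 1)) p1).map (· + (first + 1)) with
          | none => false  -- ValueError
          | some second =>
            cocScanA target_pgns (PySem.List.slice sequence (some ((second : Int) + 1)) none)

-- ===== PORT B =====
-- 'for i, value in enumerate(sequence): positions.setdefault(value, []).append(i)'
def cocBuildPositions (sequence : List Int) : PySem.Dict Int (List Int) :=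
  (PySem.List.enumerate sequence 0).foldl (fun d p => d.modify p.2 [] (· ++ [p.1])) PySem.Dict.empty

def contains_ordered_chain_py_alt (sequence : List Int) (required_prefix : List Int) (target_pgns : List Int) : Bool :=
  let positions := cocBuildPositions sequence
  if positions.items = [] then false   -- 'if not positions'
  else
    match PySem.List.pyGet? required_prefix 0 with
    | none => false      -- IndexError (excluded by Pre_)
    | some p0 =>
      match positions.get? p0 with
      | none => false    -- 'occ0 is None'
      | some occ0 =>
        match PySem.List.pyGet? occ0 0 with
        | none => false  -- unreachable: stored occurrence lists are nonempty
        | some first =>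
          match PySem.List.pyGet? required_prefix 1 with
          | none => false  -- IndexError (excluded by Pre_)
          | some p1 =>
            -- 'second = next((j for j in positions.get(p1, []) if j > first), None)'
            match List.find? (fun j => decide (first < j)) (positions.getD p1 []) with
            | none => false
            | some second =>
              -- 'any(t in positions and positions[t][-1] > second for t in target_pgns)'
              target_pgns.any (fun t =>
                match positions.get? t with
                | none => false
                | some occ =>
                  match PySem.List.pyGet? occ (-1) with
                  | none => false
                  | some last => decide (second < last))

-- ===== PRECONDITION & SPEC =====
-- Pre_ excludes exactly the inputs where A (and B alike) raises IndexError: a nonempty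
-- sequence with an empty required_prefix, or with a one-element required_prefix whose
-- element occurs in the sequence.
def Pre_contains_ordered_chain_py (sequence : List Int) (required_prefix : List Int) (target_pgns : List Int) : Prop :=
  sequence = [] ∨ 2 ≤ required_prefix.length ∨
    (required_prefix.length = 1 ∧ ∀ p ∈ required_prefix, p ∉ sequence)
instance (sequence : List Int) (required_prefix : List Int) (target_pgns : List Int) : Decidable (Pre_contains_ordered_chain_py sequence required_prefix target_pgns) := by unfold Pre_contains_ordered_chain_py; infer_instance

def pvWitness_contains_ordered_chain_py : List Int × List Int × List Int := ([1, 2, 5], [1, 2], [5])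

def Spec_contains_ordered_chain_py (sequence : List Int) (required_prefix : List Int) (target_pgns : List Int) (out : Bool) : Prop := out = contains_ordered_chain_py_alt sequence required_prefix target_pgns
instance (sequence : List Int) (required_prefix : List Int) (target_pgns : List Int) (out : Bool) : Decidable (Spec_contains_ordered_chain_py sequence required_prefix target_pgns out) := by unfold Spec_contains_ordered_chain_py; infer_instance

-- ===== CLAIM (what is proved, stated in full; the proofs are below) =====
def Claim_equal_contains_ordered_chain_py : Prop := ∀ (sequence : List Int) (required_prefix : List Int) (target_pgns : List Int), Dom_contains_ordered_chain_py sequence required_prefix target_pgns → Pre_contains_ordered_chain_py sequence required_prefix target_pgns → Spec_contains_ordered_chain_py sequence required_prefix target_pgns (contains_ordered_chain_py sequence required_prefix target_pgns)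

-- ===== LEMMAS AND PROOFS =====

-- the list of positions (counted from n) at which v occurs in l
def cocOcc (n : Int) (l : List Int) (v : Int) : List Int :=
  ((PySem.List.enumerate l n).filter (fun p => p.2 == v)).map (·.1)

lemma cocOcc_nil (n v : Int) : cocOcc n [] v = [] := by
  simp [cocOcc, PySem.List.enumerate_nil]

lemma cocOcc_cons (n x v : Int) (xs : List Int) :
    cocOcc n (x :: xs) v =
      if x = v then n :: cocOcc (n + 1) xs v else cocOcc (n + 1) xs v := by
  simp only [cocOcc, PySem.List.enumerate_cons, List.filter_cons]
  by_cases h : x = v <;> simp [h]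

lemma cocOcc_mem_ge (n v : Int) : ∀ l : List Int, ∀ j ∈ cocOcc n l v, n ≤ j := by
  intro l
  induction l generalizing n with
  | nil => simp [cocOcc_nil]
  | cons x xs ih =>
    intro j hj
    rw [cocOcc_cons] at hj
    split_ifs at hj with h
    · rcases List.mem_cons.mp hj with rfl | hj
      · exact le_refl _
      · linarith [ih (n + 1) j hj]
    · linarith [ih (n + 1) j hj]

-- the grouping fold, re-read over the swapped pairs (specific to B's loop)
lemma cocFoldlSwap (l : List (Int × Int)) (d : PySem.Dict Int (List Int)) :
    l.foldl (fun d p => d.modify p.2 [] (· ++ [p.1])) d =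
      (l.map Prod.swap).foldl (fun d p => d.modify p.1 [] (· ++ [p.2])) d := by
  induction l generalizing d with
  | nil => rfl
  | cons x xs ih => simp [ih]

-- lookup in the built dict IS the occurrence list
lemma cocBuildPositions_getD (sequence : List Int) (v : Int) :
    (cocBuildPositions sequence).getD v [] = cocOcc 0 sequence v := by
  unfold cocBuildPositions cocOcc
  rw [cocFoldlSwap, PySem.Dict.getD_foldl_modify_append]
  simp [List.filter_map, List.map_map, Function.comp_def, Prod.swap]

lemma cocOcc_head? (v : Int) : ∀ (l : List Int) (n : Int),
    (cocOcc n l v).head? = (PySem.List.index? l v).map (fun m => (m : Int) + n) := by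
  intro l
  induction l with
  | nil => intro n; simp [cocOcc_nil, PySem.List.index?]
  | cons x xs ih =>
    intro n
    by_cases h : x = v
    · subst h
      rw [PySem.List.index?_cons_self, cocOcc_cons]
      simp
    · rw [PySem.List.index?_cons_of_ne xs h, cocOcc_cons, if_neg h, ih]
      cases PySem.List.index? xs v with
      | none => simp
      | some m => simp; ring

lemma find?_all_true {p : Int → Bool} : ∀ l : List Int, (∀ j ∈ l, p j = true) →
    l.find? p = l.head? := by
  intro l h
  cases l with
  | nil => rfl
  | cons x xs => simp [h x (by simp)]

lemma cocOcc_find_gt (v : Int) : ∀ (k : Nat) (l : List Int) (n : Int),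
    List.find? (fun j => decide (n + k ≤ j)) (cocOcc n l v) =
      (PySem.List.index? (l.drop k) v).map (fun m => ((m + k : Nat) : Int) + n) := by
  intro k
  induction k with
  | zero =>
    intro l n
    rw [find?_all_true _ (fun j hj => by
      have := cocOcc_mem_ge n v l j hj
      simp; omega)]
    rw [List.drop_zero, cocOcc_head?]
    cases PySem.List.index? l v with
    | none => simp
    | some m => simp
  | succ k ih =>
    intro l n
    cases l with
    | nil => simp [cocOcc_nil, PySem.List.index?]
    | cons x xs =>
      rw [cocOcc_cons]
      have hdrop : (x :: xs).drop (k + 1) = xs.drop k := rfl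
      have hpred : (fun j => decide (n + ((k : Int) + 1) ≤ j)) = (fun j => decide ((n + 1) + (k : Int) ≤ j)) := by
        funext j; rw [decide_eq_decide]; omega
      have main : List.find? (fun j => decide (n + (((k : Nat) + 1 : Nat) : Int) ≤ j)) (cocOcc (n + 1) xs v)
          = (PySem.List.index? (xs.drop k) v).map (fun m => ((m + (k + 1) : Nat) : Int) + n) := by
        rw [show ((((k : Nat) + 1 : Nat)) : Int) = (k : Int) + 1 by push_cast; ring, hpred, ih xs (n + 1)]
        cases PySem.List.index? (xs.drop k) v with
        | none => simp
        | some m => simp; ring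
      split_ifs with h
      · rw [List.find?_cons, show (decide (n + (((k : Nat) + 1 : Nat) : Int) ≤ n)) = false by
          simp only [decide_eq_false_iff_not]; push_cast; omega]
        rw [main, hdrop]
      · rw [main, hdrop]
  
lemma cocOcc_mem_iff (n v j : Int) (l : List Int) :
    j ∈ cocOcc n l v ↔ ∃ (k : Nat), ∃ (h : k < l.length), j = n + k ∧ l[k] = v := by
  simp only [cocOcc, List.mem_map, List.mem_filter, PySem.List.mem_enumerate_iff]
  constructor
  · rintro ⟨⟨a, b⟩, ⟨⟨k, hk, hp⟩, hb⟩, rfl⟩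
    cases hp
    exact ⟨k, hk, rfl, by simpa using hb⟩
  · rintro ⟨k, hk, rfl, hv⟩
    exact ⟨(n + k, v), ⟨⟨k, hk, by simp [hv]⟩, by simp⟩, rfl⟩

lemma cocOcc_pairwise (n v : Int) (l : List Int) :
    (cocOcc n l v).Pairwise (· < ·) := by
  exact List.Pairwise.map _ (fun a b h => h) (List.Pairwise.filter _ (PySem.List.pairwise_lt_enumerate l n))

-- in an increasing list, something exceeds s iff the last element does
lemma pairwise_exists_gt_iff_getLast (s : Int) (l : List Int) (hp : l.Pairwise (· < ·)) :
    (∃ j ∈ l, s < j) ↔ (∃ m, l.getLast? = some m ∧ s < m) := by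
  constructor
  · rintro ⟨j, hj, hsj⟩
    obtain ⟨l', m, rfl⟩ : ∃ l' m, l = l' ++ [m] := by
      rcases List.eq_nil_or_concat l with rfl | ⟨l', m, rfl⟩
      · simp at hj
      · exact ⟨l', m, by simp⟩
    refine ⟨m, by simp, ?_⟩
    rcases List.mem_append.mp hj with h | h
    · have := (List.pairwise_append.mp hp).2.2 j h m (by simp)
      omega
    · simp at h; omega
  · rintro ⟨m, hm, hsm⟩
    exact ⟨m, List.mem_of_getLast? hm, hsm⟩

lemma cocScanA_eq_any (tgt : List Int) : ∀ l : List Int,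
    cocScanA tgt l = l.any (fun v => decide (v ∈ tgt)) := by
  intro l
  induction l with
  | nil => rfl
  | cons x xs ih =>
    simp only [cocScanA, List.any_cons]
    split_ifs with h <;> simp [h, ih]

lemma pyGet?_zero_head (xs : List Int) : PySem.List.pyGet? xs 0 = xs.head? := by
  cases xs <;> simp [PySem.List.pyGet?, PySem.List.pyIdx?]

lemma cocBuildPositions_items_ne (x : Int) (xs : List Int) :
    ¬ (cocBuildPositions (x :: xs)).items = [] := by
  intro h
  have hd : cocBuildPositions (x :: xs) = PySem.Dict.empty := PySem.Dict.ext (by simpa using h)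
  have hx := cocBuildPositions_getD (x :: xs) x
  rw [hd, PySem.Dict.getD_empty, cocOcc_cons] at hx
  simp at hx

lemma coc_mem_drop_iff (v : Int) (n : Nat) (l : List Int) :
    v ∈ l.drop n ↔ ∃ (k : Nat), ∃ (h : k < l.length), n ≤ k ∧ l[k] = v := by
  constructor
  · intro h
    obtain ⟨i, hi, hv⟩ := List.mem_iff_getElem.mp h
    have hlen : i < l.length - n := by simpa using hi
    refine ⟨n + i, by omega, by omega, ?_⟩
    rw [← hv, List.getElem_drop]
  · rintro ⟨k, hk, hnk, hv⟩
    refine List.mem_iff_getElem.mpr ⟨k - n, by simp; omega, ?_⟩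
    rw [List.getElem_drop]
    have hnk' : n + (k - n) = k := by omega
    simp only [hnk']
    exact hv

-- B's final any over the targets computes A's scan of the tail
lemma cocFinal (seq tgt : List Int) (sN : Nat) :
    cocScanA tgt (seq.drop (sN + 1)) =
      tgt.any (fun t =>
        match (cocBuildPositions seq).get? t with
        | none => false
        | some occ =>
          match PySem.List.pyGet? occ (-1) with
          | none => false
          | some last => decide ((sN : Int) < last)) := by
  rw [cocScanA_eq_any, Bool.eq_iff_iff]
  simp only [List.any_eq_true, decide_eq_true_eq]
  have hbranch : ∀ t : Int,
      ((match (cocBuildPositions seq).get? t with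
        | none => false
        | some occ =>
          match PySem.List.pyGet? occ (-1) with
          | none => false
          | some last => decide ((sN : Int) < last)) = true)
        ↔ ∃ j ∈ cocOcc 0 seq t, (sN : Int) < j := by
    intro t
    have hgd : cocOcc 0 seq t = ((cocBuildPositions seq).get? t).getD [] := by
      rw [← PySem.Dict.getD_eq_get?_getD, cocBuildPositions_getD]
    cases hg : (cocBuildPositions seq).get? t with
    | none =>
      rw [hg] at hgd
      simp [hgd]
    | some occ =>
      rw [hg] at hgd
      simp only [Option.getD_some] at hgd
      simp only []
      rw [PySem.List.pyGet?_neg_one]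
      cases hl : occ.getLast? with
      | none =>
        have hocc : occ = [] := by simpa using hl
        simp [hgd, hocc]
      | some m =>
        simp only [decide_eq_true_eq]
        rw [hgd, pairwise_exists_gt_iff_getLast _ _ (hgd ▸ cocOcc_pairwise 0 t seq)]
        constructor
        · intro h; exact ⟨m, hl, h⟩
        · rintro ⟨m', hm', h⟩
          rw [hl] at hm'
          cases hm'
          exact h
  constructor
  · rintro ⟨v, hvd, hvt⟩
    obtain ⟨k, hk, hnk, hkv⟩ := (coc_mem_drop_iff v (sN + 1) seq).mp hvd
    refine ⟨v, hvt, (hbranch v).mpr ⟨(k : Int), (cocOcc_mem_iff 0 v (k : Int) seq).mpr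
      ⟨k, hk, by simp, hkv⟩, by omega⟩⟩
  · rintro ⟨t, ht, hb⟩
    obtain ⟨j, hj, hsj⟩ := (hbranch t).mp hb
    obtain ⟨k, hk, rfl, hkv⟩ := (cocOcc_mem_iff 0 t j seq).mp hj
    refine ⟨t, (coc_mem_drop_iff t (sN + 1) seq).mpr ⟨k, hk, by omega, hkv⟩, ht⟩

-- ===== VERDICT (by name: the statement is the Claim_ definition above) =====
theorem contains_ordered_chain_py_spec : Claim_equal_contains_ordered_chain_py := by
  intro sequence required_prefix target_pgns _hdom hpre
  unfold Spec_contains_ordered_chain_py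
  cases sequence with
  | nil => rfl
  | cons x xs =>
  have hne : ¬ (x :: xs : List Int) = [] := by simp
  have hitems := cocBuildPositions_items_ne x xs
  simp only [contains_ordered_chain_py, contains_ordered_chain_py_alt, if_neg hne, if_neg hitems]
  have hgetD : ∀ v : Int, cocOcc 0 (x :: xs) v = ((cocBuildPositions (x :: xs)).get? v).getD [] := by
    intro v; rw [← PySem.Dict.getD_eq_get?_getD, cocBuildPositions_getD]
  rcases hpre with hpre | hlen | ⟨hlen1, hnot⟩
  · exact absurd hpre hne
  · obtain ⟨p0, p1, rest, rfl⟩ : ∃ p0 p1 rest, required_prefix = p0 :: p1 :: rest := by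
      match required_prefix, hlen with
      | p0 :: p1 :: rest, _ => exact ⟨p0, p1, rest, rfl⟩
      | [], h => exact absurd h (by simp)
      | [a], h => exact absurd h (by simp)
    have h0 : PySem.List.pyGet? (p0 :: p1 :: rest) (0 : Int) = some p0 := by
      have hnn : (0 : Int) ≤ (rest.length : Int) + 1 := by positivity
      simp [PySem.List.pyGet?, PySem.List.pyIdx?, hnn]
    have h1 : PySem.List.pyGet? (p0 :: p1 :: rest) (1 : Int) = some p1 := by
      simp [PySem.List.pyGet?, PySem.List.pyIdx?]
    simp only [h0, h1]
    cases hidx : PySem.List.index? (x :: xs) p0 with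
    | none =>
      have hocc : cocOcc 0 (x :: xs) p0 = [] := by
        apply List.head?_eq_none_iff.mp
        rw [cocOcc_head?, hidx]; rfl
      cases hg : (cocBuildPositions (x :: xs)).get? p0 with
      | none => rfl
      | some occ0 =>
        have ho : occ0 = [] := by rw [← hocc, hgetD p0, hg]; rfl
        simp only []
        rw [ho, pyGet?_zero_head]
        rfl
    | some first =>
      have hohead : (cocOcc 0 (x :: xs) p0).head? = some ((first : Int)) := by
        rw [cocOcc_head?, hidx]; simp
      cases hg : (cocBuildPositions (x :: xs)).get? p0 with
      | none =>
        exfalso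
        have := hgetD p0
        rw [hg] at this
        simp only [Option.getD_none] at this
        rw [this] at hohead
        simp at hohead
      | some occ0 =>
        have ho : occ0 = cocOcc 0 (x :: xs) p0 := by rw [hgetD p0, hg]; rfl
        simp only []
        rw [pyGet?_zero_head, ho, hohead]
        simp only []
        rw [cocBuildPositions_getD]
        have hfp : (fun j => decide ((first : Int) < j))
            = (fun j => decide ((0 : Int) + (((first + 1 : Nat)) : Int) ≤ j)) := by
          funext j; rw [decide_eq_decide]; push_cast; omega
        rw [hfp, cocOcc_find_gt p1 (first + 1) (x :: xs) 0]
        cases hidx2 : PySem.List.index? ((x :: xs).drop (first + 1)) p1 with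
        | none => rfl
        | some m =>
          simp only [Option.map_some, add_zero]
          have hslice : PySem.List.slice (x :: xs) (some ((((m + (first + 1)) : Nat) : Int) + 1)) none
              = (x :: xs).drop (m + (first + 1) + 1) := by
            have hcast : ((((m + (first + 1)) : Nat) : Int) + 1) = (((m + (first + 1) + 1 : Nat)) : Int) := by
              push_cast; ring
            rw [hcast, PySem.List.slice_from_natCast]
          rw [hslice]
          have harith : m + (first + 1) + 1 = (m + (first + 1)) + 1 := rfl
          rw [harith, cocFinal (x :: xs) target_pgns (m + (first + 1))]
  · obtain ⟨p0, rfl⟩ : ∃ p0, required_prefix = [p0] := by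
      match required_prefix, hlen1 with
      | [p0], _ => exact ⟨p0, rfl⟩
      | [], h => exact absurd h (by simp)
      | _ :: _ :: _, h => exact absurd h (by simp)
    have h0 : PySem.List.pyGet? [p0] (0 : Int) = some p0 := by
      simp [PySem.List.pyGet?, PySem.List.pyIdx?]
    simp only [h0]
    have hnm : p0 ∉ (x :: xs : List Int) := hnot p0 (by simp)
    have hidx : PySem.List.index? (x :: xs) p0 = none := by
      rw [PySem.List.index?_eq_none_iff]; exact hnm
    rw [hidx]
    have hocc : cocOcc 0 (x :: xs) p0 = [] := by
      apply List.head?_eq_none_iff.mp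
      rw [cocOcc_head?, hidx]; rfl
    cases hg : (cocBuildPositions (x :: xs)).get? p0 with
    | none => rfl
    | some occ0 =>
      have ho : occ0 = [] := by rw [← hocc, hgetD p0, hg]; rfl
      simp only []
      rw [ho, pyGet?_zero_head]
      rfl
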